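-- pv_equiv track=rewrite | github.com/fberton17/agent1 | src/mapping.py | normalize_area
-- ===== SOURCE A (Python) =====
-- from typing import List, Optional, Dict
--
-- AREA_MAP: Dict[str, List[str]] = {
--     "living": ["light.living_ceiling", "light.living_lamp"],
--     "dormitorio": ["light.bedroom_ceiling"],
--     "cocina": ["light.kitchen"]
-- }
--
-- AREA_ALIASES = {
--     "living": ["living", "estar", "sala"],
--     "dormitorio": ["dormitorio", "cuarto", "pieza", "habitación", "habitacion"],
--     "cocina": ["cocina", "kitchen"]
-- }
--
-- def normalize_area(text: str) -> Optional[str]: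
--     """
--     Normaliza un texto a un área canónica usando los alias.
--     Retorna el nombre canónico del área o None si no se encuentra.
--     """
--     if not text:
--         return None
--
--     t = text.lower().strip()
--
--     # Primero verificar si ya es un área canónica
--     if t in AREA_MAP:
--         return t
--
--     # Buscar en los alias
--     for canonical, variants in AREA_ALIASES.items():
--         if t == canonical or any(v == t for v in variants):
--             return canonical
--
--     return None
-- ===== SOURCE B (Python) =====
-- from typing import List, Optional, Dict
--
-- AREA_MAP: Dict[str, List[str]] = {
--     "living": ["light.living_ceiling", "light.living_lamp"],
--     "dormitorio": ["light.bedroom_ceiling"],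
--     "cocina": ["light.kitchen"]
-- }
--
-- AREA_ALIASES = {
--     "living": ["living", "estar", "sala"],
--     "dormitorio": ["dormitorio", "cuarto", "pieza", "habitación", "habitacion"],
--     "cocina": ["cocina", "kitchen"]
-- }
--
-- # Reverse index built once: every alias (and every canonical name) -> canonical area.
-- REVERSE: Dict[str, str] = {}
-- for _canonical, _variants in AREA_ALIASES.items():
--     for _v in [_canonical] + _variants:
--         if _v not in REVERSE:
--             REVERSE[_v] = _canonical
-- for _canonical in AREA_MAP:
--     if _canonical not in REVERSE:
--         REVERSE[_canonical] = _canonical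
--
-- def normalize_area(text: str) -> Optional[str]:
--     if not text:
--         return None
--     return REVERSE.get(text.lower().strip())
-- ===== Notes on version B (the rewrite author's own statement) =====
-- stated objective: simpler
-- what changed: The per-call scan over AREA_ALIASES (canonical test plus an inner any() over variants) is replaced by a reverse index built once at module load, so normalize_area is a guard plus a single dict lookup with no loop.
import Mathlib
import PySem

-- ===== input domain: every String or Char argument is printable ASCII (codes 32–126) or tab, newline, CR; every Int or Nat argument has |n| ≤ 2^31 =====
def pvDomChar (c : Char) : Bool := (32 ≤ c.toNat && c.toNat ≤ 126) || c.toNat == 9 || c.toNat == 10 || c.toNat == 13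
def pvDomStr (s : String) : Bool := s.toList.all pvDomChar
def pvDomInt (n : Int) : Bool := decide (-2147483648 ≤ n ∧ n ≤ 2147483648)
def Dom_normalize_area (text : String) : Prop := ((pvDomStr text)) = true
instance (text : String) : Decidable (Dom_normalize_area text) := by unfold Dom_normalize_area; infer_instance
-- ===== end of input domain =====

-- B replaces A's per-call alias scan with a reverse index built once; return value only, simpler lookup.

-- ===== PORT A =====
def pvAreaMap : PySem.Dict String (List String) :=
  PySem.Dict.ofList
    [("living", ["light.living_ceiling", "light.living_lamp"]),
     ("dormitorio", ["light.bedroom_ceiling"]),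
     ("cocina", ["light.kitchen"])]

def pvAreaAliases : List (String × List String) :=
  [("living", ["living", "estar", "sala"]),
   ("dormitorio", ["dormitorio", "cuarto", "pieza", "habitación", "habitacion"]),
   ("cocina", ["cocina", "kitchen"])]

-- the 'for canonical, variants in AREA_ALIASES.items()' loop with its early return
def pvAliasScan (t : String) : List (String × List String) → Option String
  | [] => none
  | (canonical, variants) :: rest =>
      if t = canonical ∨ variants.any (fun v => v = t) then some canonical
      else pvAliasScan t rest

def normalize_area (text : String) : Option String :=
  if text = "" then none
  else
    let t := PySem.Str.strip (PySem.Str.lower text)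
    if pvAreaMap.contains t then some t
    else pvAliasScan t pvAreaAliases

-- ===== PORT B =====
-- the module-level REVERSE build: for each (canonical, variants), insert canonical then
-- each variant if not present; then ensure every AREA_MAP key is present
def pvReverse : PySem.Dict String String :=
  let d := pvAreaAliases.foldl
    (fun d p =>
      ([p.1] ++ p.2).foldl
        (fun d v => if d.contains v then d else d.insert v p.1) d)
    PySem.Dict.empty
  pvAreaMap.keys.foldl
    (fun d c => if d.contains c then d else d.insert c c) d

def normalize_area_alt (text : String) : Option String :=
  if text = "" then none
  else pvReverse.get? (PySem.Str.strip (PySem.Str.lower text))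

-- ===== PRECONDITION & SPEC =====
def Spec_normalize_area (text : String) (out : Option String) : Prop := out = normalize_area_alt text
instance (text : String) (out : Option String) : Decidable (Spec_normalize_area text out) := by unfold Spec_normalize_area; infer_instance

-- ===== CLAIM (what is proved, stated in full; the proofs are below) =====
def Claim_equal_normalize_area : Prop := ∀ (text : String), Dom_normalize_area text → Spec_normalize_area text (normalize_area text)

-- ===== LEMMAS AND PROOFS =====
theorem pv_map_lit :
    pvAreaMap = PySem.Dict.mk
      [("living", ["light.living_ceiling", "light.living_lamp"]),
       ("dormitorio", ["light.bedroom_ceiling"]),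
       ("cocina", ["light.kitchen"])] := by decide

theorem pv_reverse_lit :
    pvReverse = PySem.Dict.mk
      [("living","living"),("estar","living"),("sala","living"),
       ("dormitorio","dormitorio"),("cuarto","dormitorio"),("pieza","dormitorio"),
       ("habitación","dormitorio"),("habitacion","dormitorio"),
       ("cocina","cocina"),("kitchen","cocina")] := by decide

theorem pv_core_eq (t : String) :
    (if pvAreaMap.contains t then some t else pvAliasScan t pvAreaAliases) = pvReverse.get? t := by
  rw [pv_map_lit, pv_reverse_lit]
  simp only [pvAreaMap, pvAreaAliases, pvAliasScan, PySem.Dict.ofList,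
    PySem.Dict.contains_mk, PySem.Dict.get?_mk_cons, List.any_cons, List.any_nil,
    List.contains_cons, List.contains_nil]
  by_cases h1 : t = "living" <;> by_cases h2 : t = "estar" <;> by_cases h3 : t = "sala" <;>
    by_cases h4 : t = "dormitorio" <;> by_cases h5 : t = "cuarto" <;> by_cases h6 : t = "pieza" <;>
    by_cases h7 : t = "habitación" <;> by_cases h8 : t = "habitacion" <;>
    by_cases h9 : t = "cocina" <;> by_cases h10 : t = "kitchen" <;>
    first
      | (subst_vars; decide)
      | simp [h1, Ne.symm h1, h2, Ne.symm h2, h3, Ne.symm h3, h4, Ne.symm h4, h5, Ne.symm h5, h6, Ne.symm h6, h7, Ne.symm h7, h8, Ne.symm h8, h9, Ne.symm h9, h10, Ne.symm h10, PySem.Dict.get?]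

-- ===== VERDICT (by name: the statement is the Claim_ definition above) =====
theorem normalize_area_spec : Claim_equal_normalize_area := by
  intro text _
  unfold Spec_normalize_area normalize_area normalize_area_alt
  by_cases h : text = "" <;> simp [h, pv_core_eq]
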